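-- pv_equiv track=rewrite | github.com/pypi-data/pypi-mirror-310 | packages/xython/xython-3.2.1-py3-none-any.whl/xython/youtil.py | plus_two_list_with_samelen
-- ===== SOURCE A (Python) =====
-- def plus_two_list_with_samelen(input_list_2d_1, input_list_2d_2):
-- 	"""
-- 	선택한 영역이 2개를 서로 같은것을 기준으로 묶을려고하는것이다
-- 	제일앞의 한즐이 같은것이다
-- 	만약 묶을려고 할때 자료가 없을때는 그 기준자료만큼 빈자료를 넣어서 다음자료를 추가하는 것이다
--
-- 	:param input_list_2d_1:
-- 	:param input_list_2d_2:
-- 	:return: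
-- 	"""
-- 	no_of_list_2d_1 = len(input_list_2d_1[0]) - 1
-- 	no_of_list_2d_2 = len(input_list_2d_2[1]) - 1
-- 	empty_list_2d_1 = [""] * no_of_list_2d_1
-- 	empty_list_2d_2 = [""] * no_of_list_2d_2
-- 	# 리스트형태로는 코드가 더 길어질것으로 보여서 입력자료를 사전으로 변경 한것
-- 	temp_dic = {}
-- 	for one in input_list_2d_1:
-- 		temp_dic[one[0]] = one[1:]
-- 	checked_list = []
-- 	# 기준이 되는 자료에 항목이 있을때
-- 	for one in input_list_2d_2:
-- 		if one[0] in temp_dic.keys():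
-- 			temp_dic[one[0]] = list(temp_dic[one[0]]) + list(one[1:])
-- 		else:
-- 			temp_dic[one[0]] = empty_list_2d_1 + list(one[1:])
-- 		checked_list.append(one[0])
-- 	# 기준자료에 항목이 없는것에 대한것
-- 	for one in temp_dic.keys():
-- 		if not one in checked_list:
-- 			temp_dic[one] = list(temp_dic[one]) + empty_list_2d_2
-- 	# 사전형식을 리스트로 다시 만드는것
-- 	result = []
-- 	for one in temp_dic:
-- 		result.append([one] + list(temp_dic[one]))
-- 	return result
-- ===== SOURCE B (Python) =====
-- def plus_two_list_with_samelen(input_list_2d_1, input_list_2d_2):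
--     pad1 = [""] * (len(input_list_2d_1[0]) - 1)
--     pad2 = [""] * (len(input_list_2d_2[1]) - 1)
--     d1 = {row[0]: row[1:] for row in input_list_2d_1}
--     d2 = {}
--     for row in input_list_2d_2:
--         d2.setdefault(row[0], []).extend(row[1:])
--     keys = list(d1) + [k for k in d2 if k not in d1]
--     return [[k] + d1.get(k, pad1) + d2.get(k, pad2) for k in keys]
-- ===== Notes on version B (the rewrite author's own statement) =====
-- stated objective: simpler
-- what changed: Replaces A's in-place dict mutation with checked_list and a rescan pass by two independent index tables (last-wins suffixes from list1, accumulated suffixes from list2) combined in one union-merge comprehension with per-side padding defaults.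
import Mathlib
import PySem

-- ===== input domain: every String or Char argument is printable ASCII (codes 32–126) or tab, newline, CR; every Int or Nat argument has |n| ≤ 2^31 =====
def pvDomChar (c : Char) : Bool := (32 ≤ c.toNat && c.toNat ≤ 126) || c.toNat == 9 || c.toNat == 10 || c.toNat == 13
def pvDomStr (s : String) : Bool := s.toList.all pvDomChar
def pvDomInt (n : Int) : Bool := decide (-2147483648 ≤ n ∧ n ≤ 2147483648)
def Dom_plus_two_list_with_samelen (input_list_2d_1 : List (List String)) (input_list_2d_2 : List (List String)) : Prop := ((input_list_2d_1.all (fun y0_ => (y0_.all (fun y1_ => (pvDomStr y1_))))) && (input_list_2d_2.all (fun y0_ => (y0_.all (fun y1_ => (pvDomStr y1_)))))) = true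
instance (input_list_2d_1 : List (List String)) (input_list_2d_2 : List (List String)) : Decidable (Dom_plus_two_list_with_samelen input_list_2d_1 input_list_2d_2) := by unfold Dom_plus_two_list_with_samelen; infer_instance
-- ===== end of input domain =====

-- B replaces A's in-place dict mutation + checked_list rescan by two independent index
-- tables merged in a single union pass; objective: simpler.


-- ===== PORT A =====
def plus_two_list_with_samelen (input_list_2d_1 : List (List String)) (input_list_2d_2 : List (List String)) : List (List String) :=
  let no1 : Int := (((PySem.List.pyGet? input_list_2d_1 0).getD []).length : Int) - 1
  let no2 : Int := (((PySem.List.pyGet? input_list_2d_2 1).getD []).length : Int) - 1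
  let empty1 : List String := List.replicate no1.toNat ""
  let empty2 : List String := List.replicate no2.toNat ""
  let d0 : PySem.Dict String (List String) :=
    input_list_2d_1.foldl (fun d one =>
      d.insert ((PySem.List.pyGet? one 0).getD "") (PySem.List.slice one (some 1) none))
      PySem.Dict.empty
  let p : PySem.Dict String (List String) × List String :=
    input_list_2d_2.foldl (fun p one =>
      let k := (PySem.List.pyGet? one 0).getD ""
      let d' := if p.1.contains k
                  then p.1.insert k (p.1.getD k [] ++ PySem.List.slice one (some 1) none)
                  else p.1.insert k (empty1 ++ PySem.List.slice one (some 1) none)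
      (d', p.2 ++ [k])) (d0, [])
  let dF : PySem.Dict String (List String) :=
    p.1.keys.foldl (fun d k =>
      if !(p.2.contains k) then d.insert k (d.getD k [] ++ empty2) else d) p.1
  dF.items.map (fun q => q.1 :: q.2)

-- ===== PORT B =====
def plus_two_list_with_samelen_alt (input_list_2d_1 : List (List String)) (input_list_2d_2 : List (List String)) : List (List String) :=
  let pad1 : List String := List.replicate ((((PySem.List.pyGet? input_list_2d_1 0).getD []).length : Int) - 1).toNat ""
  let pad2 : List String := List.replicate ((((PySem.List.pyGet? input_list_2d_2 1).getD []).length : Int) - 1).toNat ""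
  let d1 : PySem.Dict String (List String) :=
    input_list_2d_1.foldl (fun d row =>
      d.insert ((PySem.List.pyGet? row 0).getD "") (PySem.List.slice row (some 1) none))
      PySem.Dict.empty
  let d2 : PySem.Dict String (List String) :=
    input_list_2d_2.foldl (fun d row =>
      d.modify ((PySem.List.pyGet? row 0).getD "") [] (· ++ PySem.List.slice row (some 1) none))
      PySem.Dict.empty
  let keys : List String := d1.keys ++ d2.keys.filter (fun k => !(d1.contains k))
  keys.map (fun k => k :: (d1.getD k pad1 ++ d2.getD k pad2))

-- ===== PRECONDITION & SPEC =====
-- Pre_ excludes exactly the inputs on which Python A raises IndexError: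
-- empty input_list_2d_1 (A reads input_list_2d_1[0]), input_list_2d_2 with fewer
-- than two rows (A reads input_list_2d_2[1]), or an empty row (A reads one[0]).
def Pre_plus_two_list_with_samelen (input_list_2d_1 : List (List String)) (input_list_2d_2 : List (List String)) : Prop :=
  input_list_2d_1 ≠ [] ∧ 2 ≤ input_list_2d_2.length ∧
  (∀ r ∈ input_list_2d_1, r ≠ []) ∧ (∀ r ∈ input_list_2d_2, r ≠ [])
instance (input_list_2d_1 : List (List String)) (input_list_2d_2 : List (List String)) : Decidable (Pre_plus_two_list_with_samelen input_list_2d_1 input_list_2d_2) := by unfold Pre_plus_two_list_with_samelen; infer_instance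
def pvWitness_plus_two_list_with_samelen : List (List String) × List (List String) :=
  ([["a", "1"]], [["a", "2"], ["b", "3"]])
def Spec_plus_two_list_with_samelen (input_list_2d_1 : List (List String)) (input_list_2d_2 : List (List String)) (out : List (List String)) : Prop := out = plus_two_list_with_samelen_alt input_list_2d_1 input_list_2d_2
instance (input_list_2d_1 : List (List String)) (input_list_2d_2 : List (List String)) (out : List (List String)) : Decidable (Spec_plus_two_list_with_samelen input_list_2d_1 input_list_2d_2 out) := by unfold Spec_plus_two_list_with_samelen; infer_instance

-- ===== CLAIM (what is proved, stated in full; the proofs are below) =====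
def Claim_equal_plus_two_list_with_samelen : Prop := ∀ (input_list_2d_1 : List (List String)) (input_list_2d_2 : List (List String)), Dom_plus_two_list_with_samelen input_list_2d_1 input_list_2d_2 → Pre_plus_two_list_with_samelen input_list_2d_1 input_list_2d_2 → Spec_plus_two_list_with_samelen input_list_2d_1 input_list_2d_2 (plus_two_list_with_samelen input_list_2d_1 input_list_2d_2)

-- ===== LEMMAS AND PROOFS =====

def pvKey (r : List String) : String := (PySem.List.pyGet? r 0).getD ""
def pvSfx (r : List String) : List String := PySem.List.slice r (some 1) none
def pvS (l : List (List String)) (k : String) : List String :=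
  (l.filter (fun r => pvKey r == k)).flatMap pvSfx

def pvStepA (e1 : List String) (d : PySem.Dict String (List String)) (one : List String) :
    PySem.Dict String (List String) :=
  if d.contains (pvKey one) then d.insert (pvKey one) (d.getD (pvKey one) [] ++ pvSfx one)
  else d.insert (pvKey one) (e1 ++ pvSfx one)

def pvStep3 (c e2 : List String) (d : PySem.Dict String (List String)) (k : String) :
    PySem.Dict String (List String) :=
  if !(c.contains k) then d.insert k (d.getD k [] ++ e2) else d

theorem pvS_cons (one : List String) (l : List (List String)) (k : String) :
    pvS (one :: l) k = (if pvKey one = k then pvSfx one else []) ++ pvS l k := by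
  simp only [pvS, List.filter_cons]
  by_cases h : pvKey one = k
  · simp [h]
  · simp [h]

theorem pvS_of_not_mem (l : List (List String)) (k : String) (h : k ∉ l.map pvKey) :
    pvS l k = [] := by
  induction l with
  | nil => rfl
  | cons one rest ih =>
    simp only [List.map_cons, List.mem_cons, not_or] at h
    rw [pvS_cons, ih h.2, if_neg (fun hk => h.1 hk.symm)]
    rfl

theorem foldA_split (e1 : List String) (l : List (List String))
    (d : PySem.Dict String (List String)) (c : List String) :
    l.foldl (fun p one =>
      (if p.1.contains ((PySem.List.pyGet? one 0).getD "")
        then p.1.insert ((PySem.List.pyGet? one 0).getD "")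
          (p.1.getD ((PySem.List.pyGet? one 0).getD "") [] ++ PySem.List.slice one (some 1) none)
        else p.1.insert ((PySem.List.pyGet? one 0).getD "")
          (e1 ++ PySem.List.slice one (some 1) none),
       p.2 ++ [(PySem.List.pyGet? one 0).getD ""])) (d, c)
    = (l.foldl (pvStepA e1) d, c ++ l.map pvKey) := by
  induction l generalizing d c with
  | nil => simp
  | cons one rest ih =>
    simp only [List.foldl_cons, List.map_cons]
    rw [ih]
    simp [pvStepA, pvKey, pvSfx]

theorem stepA_eq_insert (e1 : List String) (d : PySem.Dict String (List String))
    (one : List String) :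
    pvStepA e1 d one = d.insert (pvKey one)
      (if d.contains (pvKey one) then d.getD (pvKey one) [] ++ pvSfx one else e1 ++ pvSfx one) := by
  unfold pvStepA; split <;> simp_all

theorem foldA_eq_foldl_insert (e1 : List String) (l : List (List String))
    (d : PySem.Dict String (List String)) :
    l.foldl (pvStepA e1) d
      = l.foldl (fun d one => d.insert (pvKey one)
          (if d.contains (pvKey one) then d.getD (pvKey one) [] ++ pvSfx one
           else e1 ++ pvSfx one)) d := by
  induction l generalizing d with
  | nil => rfl
  | cons one rest ih => simp only [List.foldl_cons, stepA_eq_insert, ih]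

theorem keys_foldA (e1 : List String) (l : List (List String))
    (d : PySem.Dict String (List String)) :
    (l.foldl (pvStepA e1) d).keys = PySem.Set.update d.keys (l.map pvKey) := by
  rw [foldA_eq_foldl_insert]
  exact PySem.Dict.keys_foldl_insert_key l pvKey _ d

theorem nodup_keys_foldA (e1 : List String) (l : List (List String))
    (d : PySem.Dict String (List String)) (h : d.keys.Nodup) :
    (l.foldl (pvStepA e1) d).keys.Nodup := by
  rw [foldA_eq_foldl_insert]
  exact PySem.Dict.nodup_keys_foldl_insert_key l pvKey _ d h

theorem getD_foldA (e1 : List String) (l : List (List String))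
    (d : PySem.Dict String (List String)) (k : String) :
    (l.foldl (pvStepA e1) d).getD k []
      = if d.contains k then d.getD k [] ++ pvS l k
        else if k ∈ l.map pvKey then e1 ++ pvS l k
        else d.getD k [] := by
  induction l generalizing d with
  | nil =>
    simp only [List.foldl_nil, pvS, List.filter_nil, List.flatMap_nil, List.map_nil,
      List.not_mem_nil, if_false, List.append_nil]
    split <;> rfl
  | cons one rest ih =>
    simp only [List.foldl_cons, List.map_cons, List.mem_cons]
    rw [ih, pvS_cons]
    by_cases hk : pvKey one = k
    · subst hk
      by_cases hc : d.contains (pvKey one)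
      · rw [if_pos hc]
        have h1 : (pvStepA e1 d one).contains (pvKey one) = true := by
          rw [stepA_eq_insert]; exact PySem.Dict.contains_insert_self _ _ _
        rw [if_pos h1, stepA_eq_insert, PySem.Dict.getD_insert_self, if_pos hc, if_pos rfl]
        simp [List.append_assoc]
      · rw [if_neg hc]
        have h1 : (pvStepA e1 d one).contains (pvKey one) = true := by
          rw [stepA_eq_insert]; exact PySem.Dict.contains_insert_self _ _ _
        rw [if_pos h1, stepA_eq_insert, PySem.Dict.getD_insert_self, if_neg hc, if_pos rfl,
          if_pos (Or.inl rfl)]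
        simp [List.append_assoc]
    · have hne : pvKey one ≠ k := hk
      have hkb : (k == pvKey one) = false :=
        beq_eq_false_iff_ne.mpr (fun h => hne h.symm)
      have hc' : (pvStepA e1 d one).contains k = d.contains k := by
        rw [stepA_eq_insert, PySem.Dict.contains_insert, hkb, Bool.false_or]
      have hg' : (pvStepA e1 d one).getD k [] = d.getD k [] := by
        rw [stepA_eq_insert]
        exact PySem.Dict.getD_insert_of_ne d _ _ (fun h => hne h.symm)
      rw [hc', hg', if_neg hk]
      have hiff : (k = pvKey one ∨ k ∈ rest.map pvKey) ↔ k ∈ rest.map pvKey :=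
        ⟨fun h => h.resolve_left (fun h1 => hne h1.symm), Or.inr⟩
      by_cases hc : d.contains k
      · rw [if_pos hc, if_pos hc, List.nil_append]
      · rw [if_neg hc, if_neg hc]
        by_cases hm : k ∈ rest.map pvKey
        · rw [if_pos hm, if_pos (hiff.mpr hm), List.nil_append]
        · rw [if_neg hm, if_neg (fun h => hm (hiff.mp h))]

theorem getD_foldB (l : List (List String)) (d : PySem.Dict String (List String)) (k : String) :
    (l.foldl (fun d row =>
        d.modify ((PySem.List.pyGet? row 0).getD "") []
          (· ++ PySem.List.slice row (some 1) none)) d).getD k []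
      = d.getD k [] ++ pvS l k := by
  induction l generalizing d with
  | nil => simp [pvS]
  | cons one rest ih =>
    simp only [List.foldl_cons]
    rw [ih, pvS_cons]
    by_cases hk : pvKey one = k
    · rw [if_pos hk]
      have : (d.modify ((PySem.List.pyGet? one 0).getD "") []
          (· ++ PySem.List.slice one (some 1) none)).getD k [] = d.getD k [] ++ pvSfx one := by
        have := PySem.Dict.getD_modify (d := d) (k := pvKey one) (k' := k) (d0 := [])
          (f := (· ++ pvSfx one))
        rw [show ((PySem.List.pyGet? one 0).getD "") = pvKey one from rfl,
          show (PySem.List.slice one (some 1) none) = pvSfx one from rfl, this, if_pos hk.symm, hk]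
      rw [this, List.append_assoc]
    · rw [if_neg hk]
      have : (d.modify ((PySem.List.pyGet? one 0).getD "") []
          (· ++ PySem.List.slice one (some 1) none)).getD k [] = d.getD k [] := by
        have := PySem.Dict.getD_modify (d := d) (k := pvKey one) (k' := k) (d0 := [])
          (f := (· ++ pvSfx one))
        rw [show ((PySem.List.pyGet? one 0).getD "") = pvKey one from rfl,
          show (PySem.List.slice one (some 1) none) = pvSfx one from rfl, this,
          if_neg (fun h => hk h.symm)]
      rw [this, List.nil_append]

theorem keys_foldB (l : List (List String)) (d : PySem.Dict String (List String)) :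
    (l.foldl (fun d row =>
        d.modify ((PySem.List.pyGet? row 0).getD "") []
          (· ++ PySem.List.slice row (some 1) none)) d).keys
      = PySem.Set.update d.keys (l.map pvKey) :=
  PySem.Dict.keys_foldl_modify_key l pvKey []
    (fun _ row v => v ++ PySem.List.slice row (some 1) none) d

theorem keys_fold3 (c e2 : List String) (ks : List String)
    (d : PySem.Dict String (List String)) (h : ∀ k ∈ ks, d.contains k = true) :
    (ks.foldl (pvStep3 c e2) d).keys = d.keys := by
  induction ks generalizing d with
  | nil => rfl
  | cons k rest ih =>
    simp only [List.foldl_cons]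
    have hk : d.contains k = true := h k (List.mem_cons_self ..)
    have hkeys : (pvStep3 c e2 d k).keys = d.keys := by
      unfold pvStep3; split
      · exact PySem.Dict.keys_insert_of_contains d _ hk
      · rfl
    have hcont : ∀ x ∈ rest, (pvStep3 c e2 d k).contains x = true := by
      intro x hx
      unfold pvStep3; split
      · rw [PySem.Dict.contains_insert, h x (List.mem_cons_of_mem _ hx)]
        simp
      · exact h x (List.mem_cons_of_mem _ hx)
    rw [ih _ hcont, hkeys]

theorem getD_fold3 (c e2 : List String) (ks : List String)
    (d : PySem.Dict String (List String)) (hnd : ks.Nodup)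
    (h : ∀ k ∈ ks, d.contains k = true) (k : String) :
    (ks.foldl (pvStep3 c e2) d).getD k []
      = if k ∈ ks ∧ c.contains k = false then d.getD k [] ++ e2 else d.getD k [] := by
  induction ks generalizing d with
  | nil => simp
  | cons k0 rest ih =>
    simp only [List.foldl_cons, List.mem_cons]
    have hnd' : rest.Nodup := hnd.of_cons
    have hk0nm : k0 ∉ rest := by simp at hnd; exact hnd.1
    have hcont : ∀ x ∈ rest, (pvStep3 c e2 d k0).contains x = true := by
      intro x hx
      unfold pvStep3; split
      · rw [PySem.Dict.contains_insert, h x (List.mem_cons_of_mem _ hx)]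
        simp
      · exact h x (List.mem_cons_of_mem _ hx)
    rw [ih _ hnd' hcont]
    by_cases hkk : k = k0
    · subst hkk
      have hknr : ¬(k ∈ rest ∧ c.contains k = false) := fun hc => hk0nm hc.1
      rw [if_neg hknr]
      by_cases hcc : c.contains k = false
      · have : pvStep3 c e2 d k = d.insert k (d.getD k [] ++ e2) := by
          unfold pvStep3; rw [hcc]; rfl
        rw [this, PySem.Dict.getD_insert_self, if_pos ⟨Or.inl rfl, hcc⟩]
      · have hct : c.contains k = true := by
          revert hcc; cases c.contains k <;> simp
        have : pvStep3 c e2 d k = d := by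
          unfold pvStep3; rw [hct]; rfl
        rw [this, if_neg (fun hc => hcc hc.2)]
    · have hg : (pvStep3 c e2 d k0).getD k [] = d.getD k [] := by
        unfold pvStep3; split
        · exact PySem.Dict.getD_insert_of_ne d _ _ hkk
        · rfl
      rw [hg]
      have hiff : ((k = k0 ∨ k ∈ rest) ∧ c.contains k = false)
          ↔ (k ∈ rest ∧ c.contains k = false) :=
        ⟨fun h => ⟨h.1.resolve_left hkk, h.2⟩, fun h => ⟨Or.inr h.1, h.2⟩⟩
      by_cases hc : k ∈ rest ∧ c.contains k = false
      · rw [if_pos hc, if_pos (hiff.mpr hc)]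
      · rw [if_neg hc, if_neg (fun hh => hc (hiff.mp hh))]

theorem pv_items_eq (d : PySem.Dict String (List String)) (h : d.keys.Nodup) :
    d.items = d.keys.map (fun k => (k, d.getD k [])) := by
  obtain ⟨l⟩ := d
  induction l with
  | nil => rfl
  | cons p rest ih =>
    obtain ⟨k, v⟩ := p
    have hkeys : (PySem.Dict.mk ((k, v) :: rest) : PySem.Dict String (List String)).keys
        = k :: (PySem.Dict.mk rest : PySem.Dict String (List String)).keys := by
      simp [PySem.Dict.keys]
    rw [hkeys] at h ⊢
    have hhead : (PySem.Dict.mk ((k, v) :: rest) : PySem.Dict String (List String)).getD k [] = v := by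
      rw [PySem.Dict.getD_eq_get?_getD, PySem.Dict.get?_mk_cons]
      simp
    have htail : ∀ x ∈ (PySem.Dict.mk rest : PySem.Dict String (List String)).keys,
        (PySem.Dict.mk ((k, v) :: rest) : PySem.Dict String (List String)).getD x []
          = (PySem.Dict.mk rest : PySem.Dict String (List String)).getD x [] := by
      intro x hx
      have hne : (k == x) = false := by
        have : k ≠ x := fun he => (List.nodup_cons.mp h).1 (he ▸ hx)
        simp [this]
      rw [PySem.Dict.getD_eq_get?_getD, PySem.Dict.get?_mk_cons, hne]
      simp [← PySem.Dict.getD_eq_get?_getD]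
    have h2 : (PySem.Dict.mk rest : PySem.Dict String (List String)).keys.map
          (fun x => (x, (PySem.Dict.mk ((k, v) :: rest) : PySem.Dict String (List String)).getD x []))
        = (PySem.Dict.mk rest : PySem.Dict String (List String)).keys.map
          (fun x => (x, (PySem.Dict.mk rest : PySem.Dict String (List String)).getD x [])) :=
      List.map_congr_left (fun x hx => by rw [htail x hx])
    show ((k, v) :: rest) = ((k, (PySem.Dict.mk ((k, v) :: rest) : PySem.Dict String (List String)).getD k []) ::
      (PySem.Dict.mk rest : PySem.Dict String (List String)).keys.map
        (fun x => (x, (PySem.Dict.mk ((k, v) :: rest) : PySem.Dict String (List String)).getD x [])))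
    rw [hhead, h2, ← ih (List.nodup_cons.mp h).2]

theorem pv_getD_irrel (d : PySem.Dict String (List String)) (k : String)
    (h : d.contains k = true) (a b : List String) : d.getD k a = d.getD k b := by
  rw [PySem.Dict.contains_eq_isSome_get?] at h
  obtain ⟨v, hv⟩ := Option.isSome_iff_exists.mp h
  rw [PySem.Dict.getD_eq_get?_getD, PySem.Dict.getD_eq_get?_getD, hv]
  rfl

theorem pv_d2_getD (l2 : List (List String)) (k : String) :
    (l2.foldl (fun d row =>
        d.modify ((PySem.List.pyGet? row 0).getD "") []
          (· ++ PySem.List.slice row (some 1) none)) PySem.Dict.empty).getD k []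
      = pvS l2 k := by
  rw [getD_foldB, PySem.Dict.getD_empty, List.nil_append]

theorem pv_d2_keys (l2 : List (List String)) :
    (l2.foldl (fun d row =>
        d.modify ((PySem.List.pyGet? row 0).getD "") []
          (· ++ PySem.List.slice row (some 1) none)) PySem.Dict.empty).keys
      = PySem.Set.ofList (l2.map pvKey) := by
  rw [keys_foldB, PySem.Dict.keys_empty]
  rfl

theorem pv_mem_updateA (d0 : PySem.Dict String (List String)) (c : List String) (k : String)
    (h : k ∈ d0.keys ∨ k ∈ c) : k ∈ PySem.Set.update d0.keys c := by
  rw [PySem.Set.update_eq_append_filter, List.mem_append]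
  by_cases hd : k ∈ d0.keys
  · exact Or.inl hd
  · rcases h with h | h
    · exact absurd h hd
    · right
      rw [List.mem_filter]
      refine ⟨(PySem.Set.mem_ofList c k).mpr h, ?_⟩
      rw [PySem.Set.contains_eq_listContains]
      simp [hd]

theorem pv_value_eq (l2 : List (List String)) (E1 E2 : List String)
    (d0 : PySem.Dict String (List String)) (hnd0 : d0.keys.Nodup) (k : String)
    (hk : k ∈ d0.keys ∨ (k ∈ l2.map pvKey ∧ k ∉ d0.keys)) :
    (((l2.foldl (pvStepA E1) d0).keys).foldl (pvStep3 (l2.map pvKey) E2)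
        (l2.foldl (pvStepA E1) d0)).getD k []
      = d0.getD k E1 ++ (l2.foldl (fun d row =>
          d.modify ((PySem.List.pyGet? row 0).getD "") []
            (· ++ PySem.List.slice row (some 1) none)) PySem.Dict.empty).getD k E2 := by
  have hndA := nodup_keys_foldA E1 l2 d0 hnd0
  have hmem : ∀ x ∈ (l2.foldl (pvStepA E1) d0).keys,
      (l2.foldl (pvStepA E1) d0).contains x = true :=
    fun x hx => (PySem.Dict.contains_iff_mem_keys _ x).mpr hx
  rw [getD_fold3 (l2.map pvKey) E2 _ _ hndA hmem k, getD_foldA E1 l2 d0 k]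
  by_cases hd0 : k ∈ d0.keys
  · have hd0c : d0.contains k = true := (PySem.Dict.contains_iff_mem_keys d0 k).mpr hd0
    have hkA : k ∈ (l2.foldl (pvStepA E1) d0).keys := by
      rw [keys_foldA]; exact pv_mem_updateA d0 _ k (Or.inl hd0)
    rw [if_pos hd0c, pv_getD_irrel d0 k hd0c E1 []]
    by_cases hcm : k ∈ l2.map pvKey
    · have hcc : (l2.map pvKey).contains k = true := List.contains_iff_mem.mpr hcm
      rw [if_neg (fun hcond => by rw [hcond.2] at hcc; exact Bool.false_ne_true hcc)]
      have h2c : (l2.foldl (fun d row =>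
          d.modify ((PySem.List.pyGet? row 0).getD "") []
            (· ++ PySem.List.slice row (some 1) none)) PySem.Dict.empty).contains k = true := by
        rw [PySem.Dict.contains_iff_mem_keys, pv_d2_keys]
        exact (PySem.Set.mem_ofList _ k).mpr hcm
      rw [pv_getD_irrel _ k h2c E2 [], pv_d2_getD]
    · have hcc : (l2.map pvKey).contains k = false := by
        rw [Bool.eq_false_iff]; exact fun h => hcm (List.contains_iff_mem.mp h)
      rw [if_pos ⟨hkA, hcc⟩, pvS_of_not_mem l2 k hcm, List.append_nil]
      have h2c : (l2.foldl (fun d row =>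
          d.modify ((PySem.List.pyGet? row 0).getD "") []
            (· ++ PySem.List.slice row (some 1) none)) PySem.Dict.empty).contains k = false := by
        rw [Bool.eq_false_iff, Ne, PySem.Dict.contains_iff_mem_keys, pv_d2_keys]
        exact fun h => hcm ((PySem.Set.mem_ofList _ k).mp h)
      rw [PySem.Dict.getD_of_not_contains _ E2 h2c]
  · rcases hk with hk | hk
    · exact absurd hk hd0
    have hcm : k ∈ l2.map pvKey := hk.1
    have hd0c : d0.contains k = false := by
      rw [Bool.eq_false_iff, Ne, PySem.Dict.contains_iff_mem_keys]; exact hk.2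
    have hcc : (l2.map pvKey).contains k = true := List.contains_iff_mem.mpr hcm
    rw [if_neg (fun hcond : _ ∈ _ ∧ (l2.map pvKey).contains k = false =>
        by rw [hcond.2] at hcc; exact Bool.false_ne_true hcc)]
    rw [if_neg (fun h : d0.contains k = true => by rw [hd0c] at h; exact Bool.false_ne_true h)]
    rw [if_pos hcm]
    have h2c : (l2.foldl (fun d row =>
        d.modify ((PySem.List.pyGet? row 0).getD "") []
          (· ++ PySem.List.slice row (some 1) none)) PySem.Dict.empty).contains k = true := by
      rw [PySem.Dict.contains_iff_mem_keys, pv_d2_keys]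
      exact (PySem.Set.mem_ofList _ k).mpr hcm
    rw [pv_getD_irrel _ k h2c E2 [], pv_d2_getD, PySem.Dict.getD_of_not_contains _ E1 hd0c]

-- ===== VERDICT (by name: the statement is the Claim_ definition above) =====
theorem plus_two_list_with_samelen_spec : Claim_equal_plus_two_list_with_samelen := by
  intro l1 l2 _ _
  unfold Spec_plus_two_list_with_samelen
  simp only [plus_two_list_with_samelen, plus_two_list_with_samelen_alt, foldA_split,
    List.nil_append]
  have hnd0 : (l1.foldl (fun d one =>
      d.insert ((PySem.List.pyGet? one 0).getD "")
        (PySem.List.slice one (some 1) none)) PySem.Dict.empty).keys.Nodup :=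
    PySem.Dict.nodup_keys_foldl_insert_key l1 pvKey
      (fun _ one => PySem.List.slice one (some 1) none) _ PySem.Dict.nodup_keys_empty
  -- abbreviations
  set E1 : List String :=
    List.replicate ((((PySem.List.pyGet? l1 0).getD []).length : Int) - 1).toNat "" with hE1
  set E2 : List String :=
    List.replicate ((((PySem.List.pyGet? l2 1).getD []).length : Int) - 1).toNat "" with hE2
  set d0 : PySem.Dict String (List String) := l1.foldl (fun d one =>
      d.insert ((PySem.List.pyGet? one 0).getD "")
        (PySem.List.slice one (some 1) none)) PySem.Dict.empty with hd0
  set d2 : PySem.Dict String (List String) := l2.foldl (fun d row =>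
      d.modify ((PySem.List.pyGet? row 0).getD "")
        [] (· ++ PySem.List.slice row (some 1) none)) PySem.Dict.empty with hd2
  have h3 : (fun (d : PySem.Dict String (List String)) (k : String) =>
      if !((l2.map pvKey).contains k) then d.insert k (d.getD k [] ++ E2) else d)
      = pvStep3 (l2.map pvKey) E2 := rfl
  rw [h3]
  have hndA := nodup_keys_foldA E1 l2 d0 hnd0
  have hmemA : ∀ x ∈ (l2.foldl (pvStepA E1) d0).keys,
      (l2.foldl (pvStepA E1) d0).contains x = true :=
    fun x hx => (PySem.Dict.contains_iff_mem_keys _ x).mpr hx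
  have hkeysF : (((l2.foldl (pvStepA E1) d0).keys).foldl (pvStep3 (l2.map pvKey) E2)
      (l2.foldl (pvStepA E1) d0)).keys = (l2.foldl (pvStepA E1) d0).keys :=
    keys_fold3 (l2.map pvKey) E2 _ _ hmemA
  have hndF : (((l2.foldl (pvStepA E1) d0).keys).foldl (pvStep3 (l2.map pvKey) E2)
      (l2.foldl (pvStepA E1) d0)).keys.Nodup := by rw [hkeysF]; exact hndA
  rw [pv_items_eq _ hndF, hkeysF, List.map_map]
  -- identify the two key lists
  have hkeysB : d0.keys ++ d2.keys.filter (fun k => !(d0.contains k))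
      = PySem.Set.update d0.keys (l2.map pvKey) := by
    rw [PySem.Set.update_eq_append_filter, ← pv_d2_keys l2, ← hd2]
    congr 1
    refine List.filter_congr (fun x _ => ?_)
    rw [PySem.Set.contains_eq_listContains, PySem.Dict.contains_eq_decide_mem_keys]
    by_cases hx : x ∈ d0.keys <;> simp [hx]
  have hL : (l2.foldl (pvStepA E1) d0).keys
      = d0.keys ++ d2.keys.filter (fun k => !(d0.contains k)) := by
    rw [keys_foldA]; exact hkeysB.symm
  rw [← hL]
  refine List.map_congr_left (fun k hk => ?_)
  have hk' : k ∈ d0.keys ∨ (k ∈ l2.map pvKey ∧ k ∉ d0.keys) := by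
    rw [hL] at hk
    rcases List.mem_append.mp hk with h | h
    · exact Or.inl h
    · right
      rw [List.mem_filter] at h
      have h1 : k ∈ l2.map pvKey := by
        have := h.1; rw [pv_d2_keys] at this
        exact (PySem.Set.mem_ofList _ k).mp this
      have h2 : k ∉ d0.keys := by
        have := h.2
        rw [Bool.not_eq_eq_eq_not, Bool.not_true, Bool.eq_false_iff, Ne,
          PySem.Dict.contains_eq_decide_mem_keys] at this
        exact fun hm => this (by simp [hm])
      exact ⟨h1, h2⟩
  have := pv_value_eq l2 E1 E2 d0 hnd0 k hk'
  simp only [Function.comp_apply]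
  rw [this, hd2]
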